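-- pv_equiv track=rewrite | github.com/soeunkk/2021LikeLion | meetwizard/code/meet/algorithm/timeOptimization.py | isOptimizedResult
-- ===== SOURCE A (Python) =====
-- def isOptimizedResult(times:list[int], min_time_interval):
--     times.sort()    #소요시간 오름차순 정렬
--
--     minTime = times[0]
--     userCnt = 0
--
--     for time in times:
--         #첫번째 요소이거나 min_time_interval을 벗어나지 않는 경우는 넘어감
--         if userCnt == 0 or time <= minTime + min_time_interval:
--             userCnt += 1
--         else:   #min_time_interval을 초과하는 경우 False 반환
--             return False
--
--     return True
-- ===== SOURCE B (Python) =====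
-- def isOptimizedResult(times: list[int], min_time_interval):
--     times.sort()
--     return len(times) == 1 or times[-1] - times[0] <= min_time_interval
-- ===== Notes on version B (the rewrite author's own statement) =====
-- stated objective: simpler
-- what changed: Replaces A's accumulating for-loop with userCnt over the sorted list by a single closed-form comparison of the sorted extremes (times[-1] - times[0] <= min_time_interval), keeping the in-place sort; the len==1 case covers a singleton with a negative interval, which A also accepts.
-- outside the precondition, e.g. on isOptimizedResult([], 0): A raises IndexError, B raises IndexError
import Mathlib
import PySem

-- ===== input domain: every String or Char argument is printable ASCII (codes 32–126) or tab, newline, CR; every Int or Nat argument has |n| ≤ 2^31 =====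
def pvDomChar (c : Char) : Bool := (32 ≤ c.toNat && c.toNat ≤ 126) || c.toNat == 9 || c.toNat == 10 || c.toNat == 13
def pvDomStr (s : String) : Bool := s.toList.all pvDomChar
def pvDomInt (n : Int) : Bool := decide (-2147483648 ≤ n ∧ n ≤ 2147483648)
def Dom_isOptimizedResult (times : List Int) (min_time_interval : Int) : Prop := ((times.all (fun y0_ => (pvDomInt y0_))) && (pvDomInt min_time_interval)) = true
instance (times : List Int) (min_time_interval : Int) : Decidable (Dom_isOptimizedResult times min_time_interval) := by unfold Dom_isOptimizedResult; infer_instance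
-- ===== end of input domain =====

-- B replaces A's counting loop over the sorted list by a closed-form comparison of the
-- sorted extremes (simpler); both sort `times` in place (same mutation side effect) and
-- both raise IndexError on the empty list, which Pre_ excludes.

-- ===== PORT A =====
-- the for-loop over the sorted list, carrying userCnt
def isOptimizedResultLoop (l : List Int) (minTime min_time_interval userCnt : Int) : Bool :=
  match l with
  | [] => true
  | time :: rest =>
    if userCnt == 0 || time ≤ minTime + min_time_interval then
      isOptimizedResultLoop rest minTime min_time_interval (userCnt + 1)
    else
      false

def isOptimizedResult (times : List Int) (min_time_interval : Int) : Bool :=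
  let s := PySem.List.sorted times (fun x => x) false
  match PySem.List.pyGet? s 0 with
  | none => false   -- unreachable inside Pre_ (times ≠ []): Python raises IndexError here
  | some minTime => isOptimizedResultLoop s minTime min_time_interval 0

-- ===== PORT B =====
def isOptimizedResult_alt (times : List Int) (min_time_interval : Int) : Bool :=
  let s := PySem.List.sorted times (fun x => x) false
  s.length == 1 ||
    match PySem.List.pyGet? s (-1), PySem.List.pyGet? s 0 with
    | some last, some first => decide (last - first ≤ min_time_interval)
    | _, _ => false   -- unreachable inside Pre_ (times ≠ []): Python raises IndexError here

-- ===== PRECONDITION & SPEC =====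
-- Pre_ excludes exactly the empty list, on which both A and B raise IndexError.
def Pre_isOptimizedResult (times : List Int) (min_time_interval : Int) : Prop := times ≠ []
instance (times : List Int) (min_time_interval : Int) : Decidable (Pre_isOptimizedResult times min_time_interval) := by unfold Pre_isOptimizedResult; infer_instance

def pvWitness_isOptimizedResult : List Int × Int := ([3, 1, 2], 1)

def Spec_isOptimizedResult (times : List Int) (min_time_interval : Int) (out : Bool) : Prop := out = isOptimizedResult_alt times min_time_interval
instance (times : List Int) (min_time_interval : Int) (out : Bool) : Decidable (Spec_isOptimizedResult times min_time_interval out) := by unfold Spec_isOptimizedResult; infer_instance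

-- ===== CLAIM (what is proved, stated in full; the proofs are below) =====
def Claim_equal_isOptimizedResult : Prop := ∀ (times : List Int) (min_time_interval : Int), Dom_isOptimizedResult times min_time_interval → Pre_isOptimizedResult times min_time_interval → Spec_isOptimizedResult times min_time_interval (isOptimizedResult times min_time_interval)

-- ===== LEMMAS AND PROOFS =====

-- once userCnt ≠ 0, the loop is just `all`
theorem isOptimizedResultLoop_pos (l : List Int) (minTime m c : Int) (hc : 0 < c) :
    isOptimizedResultLoop l minTime m c = l.all (fun t => t ≤ minTime + m) := by
  induction l generalizing c with
  | nil => simp [isOptimizedResultLoop]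
  | cons t rest ih =>
    have hrec := ih (c + 1) (by omega)
    simp only [isOptimizedResultLoop, List.all_cons]
    have hcf : (c == 0) = false := by simp; omega
    rw [hcf, Bool.false_or]
    by_cases h : t ≤ minTime + m
    · simp [h, hrec]
    · simp [h]

-- in a ≤-sorted chain, every element is bounded by the last element
theorem pairwise_le_getLast (l : List Int) (h : l.Pairwise (· ≤ ·)) (hne : l ≠ []) :
    ∀ x ∈ l, x ≤ l.getLast hne := by
  induction l with
  | nil => exact absurd rfl hne
  | cons a rest ih =>
    intro x hx
    cases rest with
    | nil => simp_all
    | cons b rest' =>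
      have hpw' : (b :: rest').Pairwise (· ≤ ·) := h.of_cons
      rw [List.getLast_cons (by simp)]
      rcases List.mem_cons.mp hx with rfl | hx'
      · exact (List.pairwise_cons.mp h).1 _ (List.getLast_mem _)
      · exact ih hpw' (by simp) x hx'

theorem isOptimizedResult_spec_aux (times : List Int) (m : Int) (h : times ≠ []) :
    isOptimizedResult times m = isOptimizedResult_alt times m := by
  unfold isOptimizedResult isOptimizedResult_alt
  set s := PySem.List.sorted times (fun x => x) false with hs
  have hsne : s ≠ [] := by
    intro hnil
    exact h ((PySem.List.sorted_eq_nil_iff ..).mp (hs ▸ hnil))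
  have hpw : s.Pairwise (fun a b => a ≤ b) := hs ▸ PySem.List.sorted_pairwise times (fun x => x)
  clear_value s
  obtain ⟨first, rest, rfl⟩ := List.exists_cons_of_ne_nil hsne
  match rest with
  | [] =>
    simp [PySem.List.pyGet?, PySem.List.pyIdx?, isOptimizedResultLoop]
  | t2 :: rest' =>
    have h0 : PySem.List.pyGet? (first :: t2 :: rest') 0 = some first :=
      PySem.List.pyGet?_zero_cons ..
    set L := (first :: t2 :: rest').getLast (by simp) with hL
    have hget : PySem.List.pyGet? (first :: t2 :: rest') (-1) = some L := by
      rw [PySem.List.pyGet?_neg_one, hL, List.getLast?_eq_some_getLast]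
    simp only [h0, hget, List.length_cons]
    have hlen1 : (rest'.length + 1 + 1 == 1) = false := by simp
    rw [hlen1, Bool.false_or]
    have hstep : isOptimizedResultLoop (first :: t2 :: rest') first m 0 =
        isOptimizedResultLoop (t2 :: rest') first m 1 := by
      simp [isOptimizedResultLoop]
    rw [hstep, isOptimizedResultLoop_pos _ _ _ _ one_pos]
    have hLmem : L ∈ t2 :: rest' := by
      rw [hL, List.getLast_cons (by simp)]
      exact List.getLast_mem _
    have hub : ∀ x ∈ t2 :: rest', x ≤ L :=
      fun x hx => pairwise_le_getLast _ hpw (by simp) x (List.mem_cons_of_mem _ hx)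
    rw [Bool.eq_iff_iff]
    simp only [List.all_eq_true, decide_eq_true_eq]
    constructor
    · intro hall
      have := hall L hLmem
      omega
    · intro hle x hx
      have := hub x hx
      omega

-- ===== VERDICT (by name: the statement is the Claim_ definition above) =====
theorem isOptimizedResult_spec : Claim_equal_isOptimizedResult := by
  intro times m _ hpre
  unfold Spec_isOptimizedResult
  exact isOptimizedResult_spec_aux times m hpre
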